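-- pv_equiv track=rewrite | github.com/pypi/warehouse | warehouse/admin/views/observers.py | _classify_observation
-- ===== SOURCE A (Python) =====
-- def _classify_observation(actions: dict | None, related_id) -> str:
--     """
--     Classify an observation as true_positive, false_positive, or pending.
--
--     Classification rules:
--     - true_positive: has 'remove_malware' action OR project removed (related_id=None)
--     - false_positive: has 'verdict_not_malware' action (only if no remove_malware)
--     - pending: no verdict yet
--     """
--     if not actions:
--         return "true_positive" if related_id is None else "pending"
--
--     has_not_malware = False
--     for action_data in actions.values():
--         action = action_data.get("action", "")
--         if action == "remove_malware":
--             return "true_positive"  # Takes precedence, return immediately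
--         if action == "verdict_not_malware":
--             has_not_malware = True
--
--     return "false_positive" if has_not_malware else "pending"
-- ===== SOURCE B (Python) =====
-- _RANK = {"remove_malware": 2, "verdict_not_malware": 1}
-- _VERDICT = ("pending", "false_positive", "true_positive")
--
-- def _classify_observation(actions: dict | None, related_id) -> str:
--     if not actions:
--         return "true_positive" if related_id is None else "pending"
--     best = max(_RANK.get(d.get("action", ""), 0) for d in actions.values())
--     return _VERDICT[best]
-- ===== Notes on version B (the rewrite author's own statement) =====
-- stated objective: alternative
-- what changed: Replaces the stateful early-exit loop threading a has_not_malware flag with a numeric severity encoding: each action maps to a rank (remove_malware=2, verdict_not_malware=1, other=0), the verdict is a table lookup at the maximum rank (a reduce-to-max over the values instead of a priority-flag scan).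
import Mathlib
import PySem

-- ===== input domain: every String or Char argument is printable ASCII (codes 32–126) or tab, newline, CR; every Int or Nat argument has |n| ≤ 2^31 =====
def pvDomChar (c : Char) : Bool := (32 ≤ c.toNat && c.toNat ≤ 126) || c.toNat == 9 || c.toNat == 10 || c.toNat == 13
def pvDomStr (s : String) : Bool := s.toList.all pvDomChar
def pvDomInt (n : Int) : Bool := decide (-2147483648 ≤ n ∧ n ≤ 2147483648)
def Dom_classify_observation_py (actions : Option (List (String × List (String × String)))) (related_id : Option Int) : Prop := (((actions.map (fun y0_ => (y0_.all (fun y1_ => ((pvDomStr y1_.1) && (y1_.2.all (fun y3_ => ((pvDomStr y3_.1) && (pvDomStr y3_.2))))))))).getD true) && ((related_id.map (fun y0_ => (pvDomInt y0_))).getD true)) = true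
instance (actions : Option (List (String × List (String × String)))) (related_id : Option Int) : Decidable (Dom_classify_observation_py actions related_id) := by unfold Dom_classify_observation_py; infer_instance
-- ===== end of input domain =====

-- B replaces A's stateful early-exit flag loop by a numeric severity encoding (max rank + verdict table); return value only, same cost.


-- ===== PORT A =====
-- A: early-exit loop over actions.values() threading a has_not_malware flag.
def pvActOf (ad : List (String × String)) : String := PySem.Dict.getD (PySem.Dict.ofList ad) "action" ""

def pvLoopA : List (List (String × String)) → Bool → String
  | [], hnm => if hnm then "false_positive" else "pending"
  | ad :: rest, hnm =>
    let action := pvActOf ad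
    if action = "remove_malware" then "true_positive"
    else if action = "verdict_not_malware" then pvLoopA rest true
    else pvLoopA rest hnm

def classify_observation_py (actions : Option (List (String × List (String × String)))) (related_id : Option Int) : String :=
  match actions with
  | none => if related_id = none then "true_positive" else "pending"
  | some d =>
    if d = [] then (if related_id = none then "true_positive" else "pending")
    else pvLoopA (PySem.Dict.values (PySem.Dict.ofList d)) false

-- ===== PORT B =====
-- B: map each action to a numeric rank, reduce by max, index the verdict table.
def pvRank (s : String) : Nat := PySem.Dict.getD (PySem.Dict.ofList [("remove_malware", 2), ("verdict_not_malware", 1)]) s 0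

def pvVerdict (n : Nat) : String :=
  match n with
  | 0 => "pending"
  | 1 => "false_positive"
  | _ => "true_positive"

def classify_observation_py_alt (actions : Option (List (String × List (String × String)))) (related_id : Option Int) : String :=
  match actions with
  | none => if related_id = none then "true_positive" else "pending"
  | some d =>
    if d = [] then (if related_id = none then "true_positive" else "pending")
    else
      -- Python's max over a nonempty list of Nats; exact with initial 0 since the list is nonempty here
      let best : Nat :=
        ((PySem.Dict.values (PySem.Dict.ofList d)).map
          (fun ad => pvRank (PySem.Dict.getD (PySem.Dict.ofList ad) "action" ""))).foldl Nat.max 0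
      pvVerdict best

-- ===== PRECONDITION & SPEC =====
def Spec_classify_observation_py (actions : Option (List (String × List (String × String)))) (related_id : Option Int) (out : String) : Prop := out = classify_observation_py_alt actions related_id
instance (actions : Option (List (String × List (String × String)))) (related_id : Option Int) (out : String) : Decidable (Spec_classify_observation_py actions related_id out) := by unfold Spec_classify_observation_py; infer_instance

-- ===== CLAIM (what is proved, stated in full; the proofs are below) =====
def Claim_equal_classify_observation_py : Prop := ∀ (actions : Option (List (String × List (String × String)))) (related_id : Option Int), Dom_classify_observation_py actions related_id → Spec_classify_observation_py actions related_id (classify_observation_py actions related_id)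

-- ===== LEMMAS AND PROOFS =====
def pvMaxR (xs : List (List (String × String))) : Nat :=
  (xs.map (fun ad => pvRank (pvActOf ad))).foldl Nat.max 0

lemma foldl_max_init (l : List Nat) (a : Nat) :
    l.foldl Nat.max a = Nat.max a (l.foldl Nat.max 0) := by
  induction l generalizing a with
  | nil => simp
  | cons x xs ih =>
    simp only [List.foldl_cons]
    rw [ih (Nat.max a x), ih (Nat.max 0 x)]
    simp only [show Nat.max = max from rfl, Nat.zero_max, max_assoc]

lemma pvMaxR_cons (ad : List (String × String)) (xs : List (List (String × String))) :
    pvMaxR (ad :: xs) = Nat.max (pvRank (pvActOf ad)) (pvMaxR xs) := by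
  simp only [pvMaxR, List.map_cons, List.foldl_cons]
  rw [foldl_max_init]
  simp only [show Nat.max = max from rfl, Nat.zero_max]

lemma pvRank_cases (s : String) :
    (s = "remove_malware" ∧ pvRank s = 2) ∨
    (s ≠ "remove_malware" ∧ s = "verdict_not_malware" ∧ pvRank s = 1) ∨
    (s ≠ "remove_malware" ∧ s ≠ "verdict_not_malware" ∧ pvRank s = 0) := by
  by_cases h1 : s = "remove_malware"
  · subst h1; left; exact ⟨rfl, by decide⟩
  · by_cases h2 : s = "verdict_not_malware"
    · subst h2; right; left; exact ⟨h1, rfl, by decide⟩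
    · right; right
      refine ⟨h1, h2, ?_⟩
      have hmk : PySem.Dict.ofList [("remove_malware", (2:Nat)), ("verdict_not_malware", 1)]
          = PySem.Dict.mk [("remove_malware", 2), ("verdict_not_malware", 1)] := by decide
      simp [pvRank, hmk, PySem.Dict.getD, beq_iff_eq,
        Ne.symm h1, Ne.symm h2, PySem.Dict.get?]

lemma pvLoopA_max (xs : List (List (String × String))) (b : Bool) :
    pvLoopA xs b = pvVerdict (Nat.max (if b then 1 else 0) (pvMaxR xs)) := by
  induction xs generalizing b with
  | nil => cases b <;> simp [pvLoopA, pvMaxR, pvVerdict]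
  | cons ad rest ih =>
    rcases pvRank_cases (pvActOf ad) with ⟨he, hr⟩ | ⟨hne, he, hr⟩ | ⟨hn1, hn2, hr⟩
    · have h2 : 2 ≤ Nat.max (if b then 1 else 0) (pvMaxR (ad :: rest)) := by
        rw [pvMaxR_cons, hr]
        exact le_trans (Nat.le_max_left 2 (pvMaxR rest))
          (Nat.le_max_right (if b then 1 else 0) _)
      rcases Nat.exists_eq_add_of_le' h2 with ⟨k, hk⟩
      rw [hk]
      simp only [pvLoopA]
      rw [if_pos he]
      rfl
    · simp only [pvLoopA]
      rw [if_neg hne, if_pos he, ih, pvMaxR_cons, hr]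
      cases b <;> simp
    · simp only [pvLoopA]
      rw [if_neg hn1, if_neg hn2, ih, pvMaxR_cons, hr]
      cases b <;> simp

-- ===== VERDICT (by name: the statement is the Claim_ definition above) =====
theorem classify_observation_py_spec : Claim_equal_classify_observation_py := by
  intro actions related_id _
  unfold Spec_classify_observation_py
  cases actions with
  | none => rfl
  | some d =>
    by_cases hd : d = []
    · simp [classify_observation_py, classify_observation_py_alt, hd]
    · simp only [classify_observation_py, classify_observation_py_alt, if_neg hd]
      rw [pvLoopA_max]
      simp [pvMaxR, pvActOf]
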